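-- pv_equiv track=rewrite | github.com/JulianFrattini/cira | test/integration/graphtotests/test_get_testcase_configuration.py | equal_configurations
-- ===== SOURCE A (Python) =====
-- def equal_configurations(manual_configurations: list[dict], generated_configurations: list[dict]) -> bool:
--     """Check that two lists of configurations for input parameters {parameter: True/False} are equal.
--
--     parameters:
--         manual_configurations: list of manually generated configurations
--         generated_configurations: list of automatically generated configurations
--
--     returns: True, if for every manual configuration there is exactly one equal counterpart in the list of manual configurations
--     """
--     if len(manual_configurations) != len(generated_configurations):
--         return False
--
--     for mconf in manual_configurations:
--         equivalent = [gconf for gconf in generated_configurations if gconf == mconf]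
--         if len(equivalent) != 1:
--             return False
--
--     return True
-- ===== SOURCE B (Python) =====
-- def equal_configurations(manual_configurations: list[dict], generated_configurations: list[dict]) -> bool:
--     if len(manual_configurations) != len(generated_configurations):
--         return False
--     # one classification pass: split generated keys into first-seen and duplicated
--     seen = set()
--     dups = set()
--     for gconf in generated_configurations:
--         key = frozenset(gconf.items())
--         if key in seen:
--             dups.add(key)
--         else:
--             seen.add(key)
--     # a key occurs exactly once in generated iff it is in seen - dups
--     return {frozenset(mconf.items()) for mconf in manual_configurations} <= seen - dups
-- ===== Notes on version B (the rewrite author's own statement) =====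
-- stated objective: alternative
-- what changed: B replaces A's per-manual-configuration rescan of the generated list by one classification pass that splits generated keys into first-seen and duplicated sets, and answers with a set-algebra subset test (manual keys <= seen - dups); no counts and no inner scan remain.
import Mathlib
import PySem

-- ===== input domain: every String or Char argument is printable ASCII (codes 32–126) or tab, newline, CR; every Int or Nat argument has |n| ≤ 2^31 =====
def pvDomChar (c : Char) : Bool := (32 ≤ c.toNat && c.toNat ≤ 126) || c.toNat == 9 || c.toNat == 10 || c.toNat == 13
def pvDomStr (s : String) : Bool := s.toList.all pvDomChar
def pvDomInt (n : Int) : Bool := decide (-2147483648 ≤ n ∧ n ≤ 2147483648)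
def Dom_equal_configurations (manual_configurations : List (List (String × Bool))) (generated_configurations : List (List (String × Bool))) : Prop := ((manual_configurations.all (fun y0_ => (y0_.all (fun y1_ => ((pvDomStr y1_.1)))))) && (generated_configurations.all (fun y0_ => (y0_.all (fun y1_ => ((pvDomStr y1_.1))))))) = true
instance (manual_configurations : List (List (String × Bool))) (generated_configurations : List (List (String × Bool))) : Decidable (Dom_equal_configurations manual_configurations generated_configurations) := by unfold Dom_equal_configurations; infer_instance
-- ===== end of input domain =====

-- B replaces A's per-manual-configuration scan of the generated list by one classification
-- pass splitting generated keys into first-seen and duplicated sets, then a set-subset test;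
-- objective: alternative.

-- Shared semantic primitive for Python's dict/frozenset(items) equality (order-insensitive).
-- A Python dict over (str, bool) is determined exactly by its item set; we render it as the
-- key-sorted item list of the dict built from the association list (duplicate keys: last wins),
-- so `pvCanon a = pvCanon b` holds iff the two Python dicts compare equal (equivalently, iff
-- frozenset(a.items()) == frozenset(b.items()) for the dicts a, b). Exact.
def pvCanon (cfg : List (String × Bool)) : List (String × Bool) :=
  PySem.List.sorted (PySem.Dict.ofList cfg).items (fun p => p.1) false

-- ===== PORT A =====
-- `[gconf for gconf in generated if gconf == mconf]`, then `len(...) != 1 → return False`.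
def pvALoop (generated_configurations : List (List (String × Bool))) : List (List (String × Bool)) → Bool
  | [] => true
  | mconf :: rest =>
    if ((generated_configurations.filter (fun gconf => pvCanon gconf == pvCanon mconf)).length == 1) then
      pvALoop generated_configurations rest
    else false

def equal_configurations (manual_configurations : List (List (String × Bool))) (generated_configurations : List (List (String × Bool))) : Bool :=
  if manual_configurations.length != generated_configurations.length then false
  else pvALoop generated_configurations manual_configurations

-- ===== PORT B =====
-- one pass over generated: key in seen → dups.add(key), else seen.add(key);
-- then {frozenset(m.items()) for m in manual} <= seen - dups.
def pvBLoop (sd : PySem.Set (List (String × Bool)) × PySem.Set (List (String × Bool))) :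
    List (List (String × Bool)) → PySem.Set (List (String × Bool)) × PySem.Set (List (String × Bool))
  | [] => sd
  | gconf :: rest =>
    let key := pvCanon gconf
    if PySem.Set.contains sd.1 key then pvBLoop (sd.1, PySem.Set.add sd.2 key) rest
    else pvBLoop (PySem.Set.add sd.1 key, sd.2) rest

def equal_configurations_alt (manual_configurations : List (List (String × Bool))) (generated_configurations : List (List (String × Bool))) : Bool :=
  if manual_configurations.length != generated_configurations.length then false
  else
    let sd := pvBLoop (PySem.Set.empty, PySem.Set.empty) generated_configurations
    PySem.Set.issubset (PySem.Set.ofList (manual_configurations.map pvCanon))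
      (PySem.Set.diff sd.1 sd.2)

-- ===== PRECONDITION & SPEC =====
def Spec_equal_configurations (manual_configurations : List (List (String × Bool))) (generated_configurations : List (List (String × Bool))) (out : Bool) : Prop := out = equal_configurations_alt manual_configurations generated_configurations
instance (manual_configurations : List (List (String × Bool))) (generated_configurations : List (List (String × Bool))) (out : Bool) : Decidable (Spec_equal_configurations manual_configurations generated_configurations out) := by unfold Spec_equal_configurations; infer_instance

-- ===== CLAIM =====
def Claim_equal_equal_configurations : Prop := ∀ (manual_configurations : List (List (String × Bool))) (generated_configurations : List (List (String × Bool))), Dom_equal_configurations manual_configurations generated_configurations → Spec_equal_configurations manual_configurations generated_configurations (equal_configurations manual_configurations generated_configurations)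

-- ===== LEMMAS AND PROOFS =====

-- the count of a canonical key is the length of the list A filters out
lemma pv_count_eq_filter (gen : List (List (String × Bool))) (m : List (String × Bool)) :
    (gen.map pvCanon).count (pvCanon m)
      = (gen.filter (fun g => pvCanon g == pvCanon m)).length := by
  induction gen with
  | nil => rfl
  | cons g t ih =>
    by_cases h : pvCanon g == pvCanon m
    · simp [List.count_cons, h, ih]
    · simp [List.count_cons, h, ih]

-- invariant of B's classification loop: seen collects the keys, dups the repeated ones
lemma pv_bloop_spec (gen : List (List (String × Bool)))
    (s d : PySem.Set (List (String × Bool))) :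
    (∀ k, k ∈ (pvBLoop (s, d) gen).1 ↔ (k ∈ s ∨ k ∈ gen.map pvCanon))
    ∧ (∀ k, k ∈ (pvBLoop (s, d) gen).2
        ↔ (k ∈ d ∨ (k ∈ s ∧ k ∈ gen.map pvCanon) ∨ 2 ≤ (gen.map pvCanon).count k)) := by
  induction gen generalizing s d with
  | nil => simp [pvBLoop]
  | cons g t ih =>
    have hmc : ∀ k, k ∈ List.map pvCanon (g :: t) ↔ (k = pvCanon g ∨ k ∈ t.map pvCanon) := by
      intro k; rw [List.map_cons, List.mem_cons]
    by_cases hx : pvCanon g ∈ s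
    · have hc : PySem.Set.contains s (pvCanon g) = true := (PySem.Set.contains_iff s _).mpr hx
      simp only [pvBLoop, hc, if_pos]
      obtain ⟨ih1, ih2⟩ := ih s (PySem.Set.add d (pvCanon g))
      refine ⟨fun k => ?_, fun k => ?_⟩
      · rw [ih1, hmc k]
        constructor
        · rintro (h | h)
          · exact Or.inl h
          · exact Or.inr (Or.inr h)
        · rintro (h | rfl | h)
          · exact Or.inl h
          · exact Or.inl hx
          · exact Or.inr h
      · rw [ih2, PySem.Set.mem_add d]
        by_cases hk : k = pvCanon g
        · exact iff_of_true (Or.inl (Or.inr hk))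
            (Or.inr (Or.inl ⟨hk ▸ hx, (hmc k).mpr (Or.inl hk)⟩))
        · have hcnt : (List.map pvCanon (g :: t)).count k = (t.map pvCanon).count k := by
            rw [List.map_cons, List.count_cons]; simp [Ne.symm hk]
          rw [hcnt, hmc k]
          simp only [hk, false_or, or_false]
    · have hc : PySem.Set.contains s (pvCanon g) = false := by
        simpa using (fun h => hx ((PySem.Set.contains_iff s _).mp h))
      simp only [pvBLoop, hc, Bool.false_eq_true, if_false]
      obtain ⟨ih1, ih2⟩ := ih (PySem.Set.add s (pvCanon g)) d
      refine ⟨fun k => ?_, fun k => ?_⟩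
      · rw [ih1, PySem.Set.mem_add s, hmc k]
        tauto
      · rw [ih2, PySem.Set.mem_add s]
        by_cases hk : k = pvCanon g
        · have hcnt : (List.map pvCanon (g :: t)).count k = (t.map pvCanon).count k + 1 := by
            rw [List.map_cons, List.count_cons]; rw [hk]; simp
          rw [hcnt]
          constructor
          · rintro (h | ⟨(hs | _), ht⟩ | h)
            · exact Or.inl h
            · exact absurd (hk ▸ hs) hx
            · exact Or.inr (Or.inr (by have := List.count_pos_iff.mpr ht; omega))
            · exact Or.inr (Or.inr (by omega))
          · rintro (h | ⟨hs, _⟩ | h)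
            · exact Or.inl h
            · exact absurd (hk ▸ hs) hx
            · by_cases ht : k ∈ t.map pvCanon
              · exact Or.inr (Or.inl ⟨Or.inr hk, ht⟩)
              · have := List.count_eq_zero_of_not_mem ht; omega
        · have hcnt : (List.map pvCanon (g :: t)).count k = (t.map pvCanon).count k := by
            rw [List.map_cons, List.count_cons]; simp [Ne.symm hk]
          rw [hcnt, hmc k]
          simp only [hk, false_or, or_false]

-- A's loop returns true iff every manual configuration matches exactly one generated one
lemma pv_loop_iff (gen ms : List (List (String × Bool))) :
    pvALoop gen ms = true
      ↔ ∀ m ∈ ms, (gen.filter (fun g => pvCanon g == pvCanon m)).length = 1 := by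
  induction ms with
  | nil => simp [pvALoop]
  | cons m rest ih =>
    by_cases h : (gen.filter (fun g => pvCanon g == pvCanon m)).length = 1
    · simp only [pvALoop, h, beq_self_eq_true, if_pos, ih, List.mem_cons]
      constructor
      · intro hall k hk
        rcases hk with rfl | hk
        · exact h
        · exact hall k hk
      · intro hall k hk; exact hall k (Or.inr hk)
    · have hb : ((gen.filter (fun g => pvCanon g == pvCanon m)).length == 1) = false := by
        simpa using h
      simp only [pvALoop, hb, Bool.false_eq_true, if_false]
      constructor
      · intro hf; exact absurd hf (by simp)
      · intro hall; exact absurd (hall m List.mem_cons_self) h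

-- B's subset test returns true under the same condition
lemma pv_alt_iff (gen ms : List (List (String × Bool))) :
    (PySem.Set.issubset (PySem.Set.ofList (ms.map pvCanon))
      (PySem.Set.diff (pvBLoop (PySem.Set.empty, PySem.Set.empty) gen).1
        (pvBLoop (PySem.Set.empty, PySem.Set.empty) gen).2) = true)
      ↔ ∀ m ∈ ms, (gen.filter (fun g => pvCanon g == pvCanon m)).length = 1 := by
  obtain ⟨h1, h2⟩ := pv_bloop_spec gen PySem.Set.empty PySem.Set.empty
  rw [PySem.Set.issubset_iff]
  have hmem : ∀ k, k ∈ PySem.Set.diff (pvBLoop (PySem.Set.empty, PySem.Set.empty) gen).1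
      (pvBLoop (PySem.Set.empty, PySem.Set.empty) gen).2
      ↔ (gen.map pvCanon).count k = 1 := by
    intro k
    rw [PySem.Set.mem_diff, h1, h2]
    simp only [PySem.Set.empty, List.not_mem_nil, false_or, false_and]
    constructor
    · rintro ⟨hs, hd⟩
      have := List.count_pos_iff.mpr hs
      omega
    · intro hc
      exact ⟨List.count_pos_iff.mp (by omega), by omega⟩
  constructor
  · intro hsub m hm
    rw [← pv_count_eq_filter]
    exact (hmem _).mp (hsub _ ((PySem.Set.mem_ofList _ _).mpr (List.mem_map_of_mem hm)))
  · intro hall k hk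
    obtain ⟨m, hm, rfl⟩ := List.mem_map.mp ((PySem.Set.mem_ofList _ _).mp hk)
    exact (hmem _).mpr (by rw [pv_count_eq_filter]; exact hall m hm)

-- ===== VERDICT =====
theorem equal_configurations_spec : Claim_equal_equal_configurations := by
  intro ms gen _
  unfold Spec_equal_configurations equal_configurations equal_configurations_alt
  by_cases h : ms.length = gen.length
  · simp only [h, bne_self_eq_false, Bool.false_eq_true, if_false]
    exact Bool.eq_iff_iff.mpr ((pv_loop_iff gen ms).trans (pv_alt_iff gen ms).symm)
  · have hb : (ms.length != gen.length) = true := by simpa using h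
    simp [hb]
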